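-- pv_equiv track=rewrite | github.com/miliar/Code_Jam_Webscraper | solutions_python/Problem_155/2361.py | f
-- ===== SOURCE A (Python) =====
-- def f(n,li):
-- 	n = int(n)
-- 	s = 0
-- 	ans = 0
-- 	for i in range(n+1):
-- 		if(i > s and i-s > ans):
-- 			ans = i-s
-- 		s += int(li[i])
-- 	return ans
-- ===== SOURCE B (Python) =====
-- def f(n, li):
--     n = int(n)
--     vals = [int(li[i]) for i in range(n + 1)]
--     prefixes = [0]
--     for v in vals[:n]:
--         prefixes.append(prefixes[-1] + v)
--     return max([0] + [i - prefixes[i] for i in range(n + 1)])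
-- ===== Notes on version B (the rewrite author's own statement) =====
-- stated objective: alternative
-- what changed: A interleaves a running sum and running max in one stateful loop; B is a two-pass table-then-reduce: build the value table and prefix-sum table, then take a single max over i - prefixes[i].
import Mathlib
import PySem

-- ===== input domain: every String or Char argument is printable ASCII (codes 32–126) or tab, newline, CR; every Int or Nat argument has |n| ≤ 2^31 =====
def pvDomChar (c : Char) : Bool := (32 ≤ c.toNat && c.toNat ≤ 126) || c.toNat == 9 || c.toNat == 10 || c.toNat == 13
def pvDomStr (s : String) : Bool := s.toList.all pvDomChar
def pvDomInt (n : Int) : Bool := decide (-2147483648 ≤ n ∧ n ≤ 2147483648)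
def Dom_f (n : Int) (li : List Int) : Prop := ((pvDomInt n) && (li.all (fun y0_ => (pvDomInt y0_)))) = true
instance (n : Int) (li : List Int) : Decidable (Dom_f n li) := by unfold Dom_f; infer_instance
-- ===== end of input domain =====

-- B is a two-pass table-then-reduce computation (value table, prefix-sum table, one max)
-- instead of A's single interleaved running-sum/running-max loop; same cost, different structure.

-- ===== PORT A =====
-- A: one loop over range(n+1) carrying (s, ans); li[i] read with pyGetD (in range under Pre_f).
def f (n : Int) (li : List Int) : Int :=
  (((PySem.List.pyRange 0 (n + 1) 1).foldl
    (fun (st : Int × Int) i =>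
      let ans := if i > st.1 ∧ i - st.1 > st.2 then i - st.1 else st.2
      (st.1 + PySem.List.pyGetD li i 0, ans))
    (0, 0))).2

-- ===== PORT B =====
-- B: build vals table, then prefix sums via an appending loop, then one max reduction.
def f_alt (n : Int) (li : List Int) : Int :=
  let vals := (PySem.List.pyRange 0 (n + 1) 1).map (fun i => PySem.List.pyGetD li i 0)
  let prefixes := (PySem.List.slice vals none (some n)).foldl
      (fun p v => p ++ [PySem.List.pyGetD p (-1) 0 + v]) [0]
  (PySem.List.max?
      ((0 : Int) :: (PySem.List.pyRange 0 (n + 1) 1).map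
        (fun i => i - PySem.List.pyGetD prefixes i 0))
      (fun y => y)).getD 0

-- ===== PRECONDITION & SPEC =====
-- Pre_f: the Python raises IndexError when 0 ≤ n and li has fewer than n+1 elements (A reads li[n]).
def Pre_f (n : Int) (li : List Int) : Prop := n < 0 ∨ n + 1 ≤ (li.length : Int)
instance (n : Int) (li : List Int) : Decidable (Pre_f n li) := by unfold Pre_f; infer_instance
def pvWitness_f : Int × List Int := (2, [1, 0, 3])
def Spec_f (n : Int) (li : List Int) (out : Int) : Prop := out = f_alt n li
instance (n : Int) (li : List Int) (out : Int) : Decidable (Spec_f n li out) := by unfold Spec_f; infer_instance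

-- ===== CLAIM (what is proved, stated in full; the proofs are below) =====
def Claim_equal_f : Prop := ∀ (n : Int) (li : List Int), Dom_f n li → Pre_f n li → Spec_f n li (f n li)

-- ===== LEMMAS AND PROOFS =====

-- prefix sum of the first k entries (getD form, total)
def pvS (li : List Int) (k : Nat) : Int := ((List.range k).map (fun (j : Nat) => li.getD j 0)).sum

theorem pvS_succ (li : List Int) (k : Nat) :
    pvS li (k + 1) = pvS li k + li.getD k 0 := by
  simp [pvS, List.range_succ]

-- A's loop characterised
theorem fA_state (li : List Int) (m : Nat) :
    ((PySem.List.pyRange 0 (m : Int) 1).foldl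
      (fun (st : Int × Int) i =>
        let ans := if i > st.1 ∧ i - st.1 > st.2 then i - st.1 else st.2
        (st.1 + PySem.List.pyGetD li i 0, ans))
      (0, 0))
    = (pvS li m, ((List.range m).map (fun (k : Nat) => (k : Int) - pvS li k)).foldl max 0) := by
  induction m with
  | zero => simp [PySem.List.pyRange_one_eq_nil, pvS]
  | succ m ih =>
    have hsplit : PySem.List.pyRange 0 ((m : Int) + 1) 1
        = PySem.List.pyRange 0 (m : Int) 1 ++ [(m : Int)] := by
      exact PySem.List.pyRange_one_succ_right (by positivity)
    have hcast : ((m + 1 : Nat) : Int) = (m : Int) + 1 := by push_cast; ring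
    rw [hcast, hsplit, List.foldl_append, ih]
    have h0 : (0 : Int) ≤ ((List.range m).map (fun (k : Nat) => (k : Int) - pvS li k)).foldl max 0 :=
      (PySem.List.le_foldl_max _ 0).1
    simp only [List.foldl, List.range_succ, List.map_append, List.map_cons, List.map_nil,
      List.foldl_append]
    rw [Prod.mk.injEq]
    refine ⟨?_, ?_⟩
    · rw [pvS_succ]
      simp [PySem.List.pyGetD_natCast]
    · by_cases h : ((m : Int)) > pvS li m ∧ (m : Int) - pvS li m >
          ((List.range m).map (fun (k : Nat) => (k : Int) - pvS li k)).foldl max 0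
      · simp only [if_pos h]; omega
      · simp only [if_neg h]; omega

-- the appending prefix loop is scanl
theorem prefixes_eq_scanl (vs : List Int) (p : List Int) (a : Int) :
    vs.foldl (fun p v => p ++ [PySem.List.pyGetD p (-1) 0 + v]) (p ++ [a])
    = p ++ vs.scanl (· + ·) a := by
  induction vs generalizing p a with
  | nil => simp
  | cons v vs ih =>
    simp only [List.foldl_cons, List.scanl_cons]
    rw [PySem.List.pyGetD_neg_one_append_singleton]
    have : p ++ [a] ++ [a + v] = (p ++ [a]) ++ [a + v] := by simp
    rw [this, ih (p ++ [a]) (a + v)]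
    simp

-- indexing into scanl gives prefix sums
theorem scanl_getD (vs : List Int) (a : Int) (k : Nat) (hk : k ≤ vs.length) :
    (vs.scanl (· + ·) a).getD k 0 = a + (vs.take k).sum := by
  induction vs generalizing a k with
  | nil =>
    have hk0 : k = 0 := by simpa using hk
    subst hk0
    simp [List.scanl_nil]
  | cons v vs ih =>
    cases k with
    | zero => simp [List.scanl_cons]
    | succ k =>
      simp only [List.scanl_cons, List.getD_cons_succ, List.take_succ_cons, List.sum_cons]
      rw [ih (a + v) k (by simpa using hk)]
      ring

theorem f_eq_f_alt (n : Int) (li : List Int) : f n li = f_alt n li := by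
  unfold f f_alt
  by_cases hn : 0 ≤ n
  · -- write everything over m := (n+1).toNat
    obtain ⟨t, ht⟩ : ∃ t : Nat, n = (t : Int) := ⟨n.toNat, (Int.toNat_of_nonneg hn).symm⟩
    subst ht
    have hcast : ((t : Int) + 1) = ((t + 1 : Nat) : Int) := by push_cast; ring
    rw [hcast, fA_state li (t + 1)]
    -- simplify B's tables
    have hvals : (PySem.List.pyRange 0 ((t + 1 : Nat) : Int) 1).map
        (fun i => PySem.List.pyGetD li i 0)
        = (List.range (t + 1)).map (fun (k : Nat) => li.getD k 0) := by
      rw [PySem.List.pyRange_one]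
      simp [Function.comp_def, PySem.List.pyGetD_natCast]
    rw [hvals]
    have hslice : PySem.List.slice ((List.range (t + 1)).map (fun (k : Nat) => li.getD k 0))
          none (some ((t : Nat) : Int))
        = (List.range t).map (fun (k : Nat) => li.getD k 0) := by
      rw [PySem.List.slice_to_natCast]
      rw [← List.map_take, List.take_range]
      simp
    simp only [hslice]
    have hpre : ((List.range t).map (fun (k : Nat) => li.getD k 0)).foldl
          (fun p v => p ++ [PySem.List.pyGetD p (-1) 0 + v]) [0]
        = ((List.range t).map (fun (k : Nat) => li.getD k 0)).scanl (· + ·) 0 := by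
      have := prefixes_eq_scanl ((List.range t).map (fun (k : Nat) => li.getD k 0)) [] 0
      simpa using this
    simp only [hpre]
    have hidx : ∀ k : Nat, k ≤ t →
        (((List.range t).map (fun (j : Nat) => li.getD j 0)).scanl (· + ·) 0).getD k 0 = pvS li k := by
      intro k hk
      rw [scanl_getD _ _ k (by simpa using hk)]
      rw [← List.map_take, List.take_range]
      simp [pvS, hk]
    have hmapeq : (PySem.List.pyRange 0 ((t + 1 : Nat) : Int) 1).map
        (fun i => i - PySem.List.pyGetD
          (((List.range t).map (fun (k : Nat) => li.getD k 0)).scanl (· + ·) 0) i 0)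
        = (List.range (t + 1)).map (fun (k : Nat) => (k : Int) - pvS li k) := by
      rw [PySem.List.pyRange_one]
      simp only [Int.sub_zero, Int.toNat_natCast, List.map_map]
      refine List.map_congr_left ?_
      intro k hk
      have hk' : k ≤ t := by
        simp only [List.mem_range] at hk; omega
      simp only [Function.comp_def, Int.zero_add, PySem.List.pyGetD_natCast]
      rw [hidx k hk']
    simp only [hmapeq, PySem.List.max?_id_cons]
    simp
  · -- n < 0 : empty range on both sides
    replace hn : n + 1 ≤ 0 := by omega
    have hnil : PySem.List.pyRange 0 (n + 1) 1 = [] :=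
      PySem.List.pyRange_one_eq_nil hn
    rw [hnil]
    have hslice : PySem.List.slice ([] : List Int) none (some n) = [] := by
      simp [PySem.List.slice]
    simp only [List.map_nil, hslice, List.foldl_nil, PySem.List.max?_id_cons, Option.getD_some]

-- ===== VERDICT (by name: the statement is the Claim_ definition above) =====
theorem f_spec : Claim_equal_f := by
  intro n li _ _
  unfold Spec_f
  exact f_eq_f_alt n li
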